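-- pv_equiv track=rewrite | github.com/Moxin1044/MyCTFscript | 出题/Crypto/01248yunying.py | yunying_encode
-- ===== SOURCE A (Python) =====
-- def yunying_encode(plaintext):
--     plaintext = plaintext.upper()
--     res = []
--     for ch in plaintext:
--         num = ord(ch) - 64
--         parts = []
--         for val in [8, 4, 2, 1]:
--             while num >= val:
--                 num -= val
--                 parts.append(str(val))
--         res.append(''.join(parts))
--     return '0'.join(res)
-- ===== SOURCE B (Python) =====
-- def yunying_encode(plaintext):
--     out = []
--     for ch in plaintext.upper():
--         n = ord(ch) - 64
--         s = ''
--         if n > 0: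
--             s = '8' * (n // 8) + '4' * (n % 8 // 4) + '2' * (n % 4 // 2) + '1' * (n % 2)
--         out.append(s)
--     return '0'.join(out)
-- ===== Notes on version B (the rewrite author's own statement) =====
-- stated objective: simpler
-- what changed: The nested per-value repeated-subtraction while-loops and the parts list are replaced by one closed-form expression per character built from integer division and modulo by 8, 4, 2 and 1.
import Mathlib
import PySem

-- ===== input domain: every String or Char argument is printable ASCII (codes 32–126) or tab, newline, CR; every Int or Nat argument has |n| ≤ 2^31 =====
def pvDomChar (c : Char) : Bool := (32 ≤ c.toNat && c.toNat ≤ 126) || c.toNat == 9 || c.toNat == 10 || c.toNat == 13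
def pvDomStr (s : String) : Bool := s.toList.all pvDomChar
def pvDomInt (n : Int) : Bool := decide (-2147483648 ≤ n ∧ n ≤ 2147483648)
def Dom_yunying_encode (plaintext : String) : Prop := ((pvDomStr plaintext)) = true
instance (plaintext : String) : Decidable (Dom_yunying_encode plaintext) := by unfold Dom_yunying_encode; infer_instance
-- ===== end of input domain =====

-- B replaces A's per-value repeated-subtraction while-loops by one closed-form
-- division/modulo expression per character (objective: simpler).

-- ===== PORT A =====
-- the Python 'while num >= val: num -= val; parts.append(str(val))' loop over state (num, parts);
-- the extra '1 ≤ val' conjunct only makes the recursion total (Python diverges there; A only calls val ∈ {8,4,2,1})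
def pyWhileSub (st : Int × List (List Char)) (val : Int) : Int × List (List Char) :=
  if _h : 1 ≤ val ∧ val ≤ st.1 then
    pyWhileSub (st.1 - val, st.2 ++ [PySem.Int.toChars val]) val
  else st
termination_by st.1.toNat
decreasing_by omega

def yunying_encode (plaintext : String) : String :=
  let pt := PySem.Str.upper plaintext
  let res := pt.toList.foldl (fun res ch =>
    let num : Int := (ch.toNat : Int) - 64
    let st := ([8, 4, 2, 1] : List Int).foldl pyWhileSub (num, ([] : List (List Char)))
    res ++ [PySem.Chars.join [] st.2]) ([] : List (List Char))
  String.ofList (PySem.Chars.join ['0'] res)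

-- ===== PORT B =====
-- the digit string: (n//8) eights, (n%8//4) fours, (n%4//2) twos, (n%2) ones, guarded by n > 0
def encChar (n : Int) : List Char :=
  if 0 < n then
    List.replicate (PySem.Int.floordiv n 8).toNat '8'
    ++ List.replicate (PySem.Int.floordiv (PySem.Int.mod n 8) 4).toNat '4'
    ++ List.replicate (PySem.Int.floordiv (PySem.Int.mod n 4) 2).toNat '2'
    ++ List.replicate (PySem.Int.mod n 2).toNat '1'
  else []

def yunying_encode_alt (plaintext : String) : String :=
  String.ofList (PySem.Chars.join ['0']
    ((PySem.Str.upper plaintext).toList.map (fun ch => encChar ((ch.toNat : Int) - 64))))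

-- ===== PRECONDITION & SPEC =====
def Spec_yunying_encode (plaintext : String) (out : String) : Prop := out = yunying_encode_alt plaintext
instance (plaintext : String) (out : String) : Decidable (Spec_yunying_encode plaintext out) := by unfold Spec_yunying_encode; infer_instance

-- ===== CLAIM (what is proved, stated in full; the proofs are below) =====
def Claim_equal_yunying_encode : Prop := ∀ (plaintext : String), Dom_yunying_encode plaintext → Spec_yunying_encode plaintext (yunying_encode plaintext)

-- ===== LEMMAS AND PROOFS =====

-- the while-loop computes floor-division count and remainder
lemma pyWhileSub_stop (st : Int × List (List Char)) (val : Int) (h : st.1 < val) :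
    pyWhileSub st val = st := by
  rw [pyWhileSub]; simp; omega

lemma pyWhileSub_spec (val : Int) (hv : 1 ≤ val) :
    ∀ (n : Int), 0 ≤ n → ∀ (parts : List (List Char)),
      pyWhileSub (n, parts) val =
        (PySem.Int.mod n val,
         parts ++ List.replicate (PySem.Int.floordiv n val).toNat (PySem.Int.toChars val)) := by
  have key : ∀ (k : Nat) (n : Int), n.toNat = k → 0 ≤ n → ∀ (parts : List (List Char)),
      pyWhileSub (n, parts) val =
        (PySem.Int.mod n val,
         parts ++ List.replicate (PySem.Int.floordiv n val).toNat (PySem.Int.toChars val)) := by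
    intro k
    induction k using Nat.strong_induction_on with
    | _ k ih =>
      intro n hk hn parts
      by_cases h : val ≤ n
      · rw [pyWhileSub]
        simp only [dif_pos (And.intro hv h)]
        rw [ih (n - val).toNat (by omega) (n - val) rfl (by omega)]
        have hmod : PySem.Int.mod (n - val) val = PySem.Int.mod n val := by
          rw [PySem.Int.mod_eq_emod_of_pos (show (0:Int) < val by omega),
              PySem.Int.mod_eq_emod_of_pos (show (0:Int) < val by omega)]
          exact Int.sub_emod_right n val
        have hdiv : PySem.Int.floordiv (n - val) val = PySem.Int.floordiv n val - 1 := by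
          rw [PySem.Int.floordiv_eq_ediv_of_pos (show (0:Int) < val by omega),
              PySem.Int.floordiv_eq_ediv_of_pos (show (0:Int) < val by omega)]
          have := Int.add_mul_ediv_right n (-1) (by omega : val ≠ 0)
          simpa [sub_eq_add_neg, neg_mul] using this
        have hpos : 1 ≤ PySem.Int.floordiv n val := by
          rw [PySem.Int.le_floordiv_iff_mul_le (show (0:Int) < val by omega)]; omega
        rw [hmod, hdiv]
        have hcnt : (PySem.Int.floordiv n val).toNat
            = ((PySem.Int.floordiv n val - 1).toNat) + 1 := by omega
        rw [hcnt, List.replicate_succ, List.append_assoc]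
        rfl
      · rw [pyWhileSub_stop _ _ (by simpa using by omega : (n, parts).1 < val)]
        have hlt : n < val := by omega
        have hmod : PySem.Int.mod n val = n := by
          rw [PySem.Int.mod_eq_emod_of_pos (show (0:Int) < val by omega)]
          exact Int.emod_eq_of_lt hn hlt
        have hdiv : PySem.Int.floordiv n val = 0 := by
          rw [PySem.Int.floordiv_eq_ediv_of_pos (show (0:Int) < val by omega)]
          exact Int.ediv_eq_zero_of_lt hn hlt
        rw [hmod, hdiv]
        simp
  intro n hn parts
  exact key n.toNat n rfl hn parts

lemma join_nil_eq_flatten (l : List (List Char)) : PySem.Chars.join [] l = l.flatten := by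
  induction l with
  | nil => simp [PySem.Chars.join_nil]
  | cons a t ih =>
    cases t with
    | nil => simp [PySem.Chars.join_singleton]
    | cons b t' => simp [PySem.Chars.join_cons_cons, ih]

lemma flatten_replicate_singleton (k : Nat) (c : Char) :
    (List.replicate k ([c] : List Char)).flatten = List.replicate k c := by
  induction k with
  | zero => simp
  | succ k ih => simp [List.replicate_succ, ih]

-- per character, A's greedy loop equals B's closed form, for EVERY integer
lemma char_eq (n : Int) :
    PySem.Chars.join [] ((([8, 4, 2, 1] : List Int).foldl pyWhileSub (n, [])).2) = encChar n := by
  by_cases hn : 0 ≤ n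
  · simp only [List.foldl]
    rw [pyWhileSub_spec 8 (by omega) n hn,
        pyWhileSub_spec 4 (by omega) _ (PySem.Int.mod_nonneg _ (by omega)),
        pyWhileSub_spec 2 (by omega) _ (PySem.Int.mod_nonneg _ (by omega)),
        pyWhileSub_spec 1 (by omega) _ (PySem.Int.mod_nonneg _ (by omega))]
    have e8 : PySem.Int.toChars 8 = ['8'] := by decide
    have e4 : PySem.Int.toChars 4 = ['4'] := by decide
    have e2 : PySem.Int.toChars 2 = ['2'] := by decide
    have e1 : PySem.Int.toChars 1 = ['1'] := by decide
    have m84 : PySem.Int.mod (PySem.Int.mod n 8) 4 = PySem.Int.mod n 4 := by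
      simp only [PySem.Int.mod_eq_emod_of_pos (show (0:Int) < 8 by omega),
        PySem.Int.mod_eq_emod_of_pos (show (0:Int) < 4 by omega)]
      exact Int.emod_emod_of_dvd n (by decide)
    have m42 : PySem.Int.mod (PySem.Int.mod n 4) 2 = PySem.Int.mod n 2 := by
      simp only [PySem.Int.mod_eq_emod_of_pos (show (0:Int) < 4 by omega),
        PySem.Int.mod_eq_emod_of_pos (show (0:Int) < 2 by omega)]
      exact Int.emod_emod_of_dvd n (by decide)
    have d1 : ∀ m : Int, PySem.Int.floordiv m 1 = m := by
      intro m
      rw [PySem.Int.floordiv_eq_ediv_of_pos (show (0:Int) < 1 by omega)]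
      exact Int.ediv_one m
    rw [e8, e4, e2, e1, m84, m42, d1]
    rw [join_nil_eq_flatten]
    simp only [List.nil_append, List.flatten_append, flatten_replicate_singleton]
    rcases lt_or_eq_of_le hn with hpos | hzero
    · rw [encChar, if_pos hpos]
    · subst hzero
      decide
  · have hstop : ∀ val : Int, 1 ≤ val →
        ∀ parts, pyWhileSub (n, parts) val = (n, parts) := by
      intro val hv parts
      exact pyWhileSub_stop _ _ (by simpa using by omega)
    simp only [List.foldl]
    rw [hstop 8 (by omega), hstop 4 (by omega), hstop 2 (by omega), hstop 1 (by omega)]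
    rw [encChar, if_neg (by omega)]
    simp [PySem.Chars.join_nil]

-- ===== VERDICT (by name: the statement is the Claim_ definition above) =====
theorem yunying_encode_spec : Claim_equal_yunying_encode := by
  intro plaintext _
  simp only [Spec_yunying_encode, yunying_encode, yunying_encode_alt]
  rw [PySem.List.foldl_append_singleton_eq_map, List.nil_append]
  congr 2
  exact List.map_congr_left (fun ch _ => char_eq _)
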